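-- pv_equiv track=rewrite | github.com/cratejoy/hirecj | agents/scripts/demos/play_conversation_simple.py | count_llm_calls_in_response
-- ===== SOURCE A (Python) =====
-- from typing import Optional, Dict, Any
--
-- def count_llm_calls_in_response(response_str: str) -> Dict[str, int]:
--     """Count LLM calls and tool usage from the response."""
--     metrics = {
--         "thoughts": response_str.count("Thought:"),
--         "tool_calls": response_str.count("Using tool:"),
--         "tool_outputs": response_str.count("Tool Output:"),
--         "prompts": 1,  # Base prompt
--     }
--
--     # Estimate total prompts (initial + one per thought + retries)
--     metrics["prompts"] = max(1, metrics["thoughts"]) + metrics["tool_calls"]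
--
--     # Extract tool names
--     tool_names = []
--     if "Using tool:" in response_str:
--         lines = response_str.split("\n")
--         for i, line in enumerate(lines):
--             if "Using tool:" in line:
--                 tool_name = line.split("Using tool:")[-1].strip()
--                 tool_names.append(tool_name)
--
--     return metrics, tool_names
-- ===== SOURCE B (Python) =====
-- def count_llm_calls_in_response(response_str: str):
--     """Single fused pass over the lines: sum per-line marker counts and
--     extract tool names in the same traversal."""
--     thoughts = tool_calls = tool_outputs = 0
--     tool_names = []
--     for line in response_str.split("\n"):
--         thoughts += line.count("Thought:")
--         tc = line.count("Using tool:")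
--         tool_calls += tc
--         tool_outputs += line.count("Tool Output:")
--         if tc:
--             tool_names.append(line.split("Using tool:")[-1].strip())
--     return {
--         "thoughts": thoughts,
--         "tool_calls": tool_calls,
--         "tool_outputs": tool_outputs,
--         "prompts": max(1, thoughts) + tool_calls,
--     }, tool_names
-- ===== Notes on version B (the rewrite author's own statement) =====
-- stated objective: alternative
-- what changed: Replaces three whole-string str.count scans plus a separate guarded extraction loop over the lines with one fused loop over the newline-split lines that accumulates the per-line marker counts and appends tool names in the same traversal.
import Mathlib
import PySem

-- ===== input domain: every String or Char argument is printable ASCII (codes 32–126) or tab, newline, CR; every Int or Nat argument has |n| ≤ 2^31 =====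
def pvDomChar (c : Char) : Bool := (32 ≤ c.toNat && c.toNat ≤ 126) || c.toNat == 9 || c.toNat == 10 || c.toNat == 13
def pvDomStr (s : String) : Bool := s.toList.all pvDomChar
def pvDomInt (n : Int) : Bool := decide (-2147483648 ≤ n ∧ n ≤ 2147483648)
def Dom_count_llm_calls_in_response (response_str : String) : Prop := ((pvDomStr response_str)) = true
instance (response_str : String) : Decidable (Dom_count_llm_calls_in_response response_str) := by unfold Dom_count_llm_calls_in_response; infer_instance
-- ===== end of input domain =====

-- B fuses A's three whole-string count scans and its separate extraction loop into one pass over the lines (objective: alternative decomposition, same asymptotic cost).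

-- ===== PORT A =====
-- A's extraction 'line.split("Using tool:")[-1]' uses xs[-1]; the split list is
-- always nonempty, so the pyGetD default [] is unreachable (exact on all inputs).
def count_llm_calls_in_response (response_str : String) : (List (String × Int)) × List String :=
  let th : Int := (PySem.Str.count response_str "Thought:" : Int)
  let tc : Int := (PySem.Str.count response_str "Using tool:" : Int)
  let tout : Int := (PySem.Str.count response_str "Tool Output:" : Int)
  let metrics := (PySem.Dict.ofList
      [("thoughts", th), ("tool_calls", tc), ("tool_outputs", tout), ("prompts", (1 : Int))]).insert
      "prompts" (max 1 th + tc)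
  let tool_names : List String :=
    if PySem.Str.isIn "Using tool:" response_str then
      (PySem.Chars.splitOn response_str.toList "\n".toList).foldl
        (fun acc line =>
          if PySem.Chars.isIn "Using tool:".toList line then
            acc ++ [String.ofList (PySem.Chars.strip
              (PySem.List.pyGetD (PySem.Chars.splitOn line "Using tool:".toList) (-1) []))]
          else acc) []
    else []
  (metrics.items, tool_names)

-- ===== PORT B =====
def count_llm_calls_in_response_alt (response_str : String) : (List (String × Int)) × List String :=
  let r := (PySem.Chars.splitOn response_str.toList "\n".toList).foldl
    (fun (st : (Int × Int × Int) × List String) line =>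
      let tc := PySem.Chars.count line "Using tool:".toList
      ((st.1.1 + (PySem.Chars.count line "Thought:".toList : Int),
        st.1.2.1 + (tc : Int),
        st.1.2.2 + (PySem.Chars.count line "Tool Output:".toList : Int)),
       if tc ≠ 0 then
         st.2 ++ [String.ofList (PySem.Chars.strip
           (PySem.List.pyGetD (PySem.Chars.splitOn line "Using tool:".toList) (-1) []))]
       else st.2))
    ((0, 0, 0), [])
  ((PySem.Dict.ofList
      [("thoughts", r.1.1), ("tool_calls", r.1.2.1), ("tool_outputs", r.1.2.2),
       ("prompts", max 1 r.1.1 + r.1.2.1)]).items, r.2)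

-- ===== PRECONDITION & SPEC =====
def Spec_count_llm_calls_in_response (response_str : String) (out : (List (String × Int)) × List String) : Prop := out = count_llm_calls_in_response_alt response_str
instance (response_str : String) (out : (List (String × Int)) × List String) : Decidable (Spec_count_llm_calls_in_response response_str out) := by unfold Spec_count_llm_calls_in_response; infer_instance

-- ===== CLAIM (what is proved, stated in full; the proofs are below) =====
def Claim_equal_count_llm_calls_in_response : Prop := ∀ (response_str : String), Dom_count_llm_calls_in_response response_str → Spec_count_llm_calls_in_response response_str (count_llm_calls_in_response response_str)

-- ===== LEMMAS AND PROOFS =====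

-- greedy non-overlapping occurrence count, structural form of Python's str.count
def pvCnt (sub : List Char) : List Char → Nat
  | [] => 0
  | c :: t =>
    if sub.isPrefixOf (c :: t) then pvCnt sub (t.drop (sub.length - 1)) + 1
    else pvCnt sub t
termination_by l => l.length
decreasing_by
  · simpa using Nat.lt_succ_of_le (Nat.le_trans (List.length_drop_le _ _) (Nat.le_refl _))
  · simp

-- structural form of s.split("\n")
def pvSplitNl : List Char → List (List Char)
  | [] => [[]]
  | c :: t => if c = '\n' then [] :: pvSplitNl t
              else match pvSplitNl t with
                   | [] => [[c]]
                   | h :: r => (c :: h) :: r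

theorem pvSplitNl_ne_nil (l : List Char) : pvSplitNl l ≠ [] := by
  induction l with
  | nil => simp [pvSplitNl]
  | cons c t ih =>
    simp only [pvSplitNl]
    split
    · simp
    · cases h : pvSplitNl t <;> simp

theorem pvCnt_eq_countgo (sub : List Char) (hsub : sub ≠ []) :
    ∀ (fuel : Nat) (l : List Char) (acc : Nat), l.length ≤ fuel →
      PySem.Chars.count.go sub fuel l acc = acc + pvCnt sub l := by
  intro fuel
  induction fuel with
  | zero =>
    intro l acc h
    have hl : l = [] := List.eq_nil_of_length_eq_zero (Nat.le_zero.mp h)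
    subst hl
    simp [PySem.Chars.count.go, pvCnt]
  | succ n ih =>
    intro l acc h
    cases l with
    | nil => simp [PySem.Chars.count.go, pvCnt]
    | cons c t =>
      rw [PySem.Chars.count.go]
      by_cases hp : sub.isPrefixOf (c :: t)
      · simp only [hp, if_true]
        obtain ⟨a, sa, hs⟩ := List.exists_cons_of_ne_nil hsub
        subst hs
        rw [ih (List.drop (a :: sa).length (c :: t)) (acc + 1)
          (by simp only [List.length_drop, List.length_cons] at h ⊢; omega)]
        simp only [pvCnt, hp, if_true, List.length_cons, List.drop_succ_cons,
          Nat.add_sub_cancel]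
        omega
      · simp only [hp]
        rw [ih t acc (by simpa using Nat.le_of_succ_le_succ h)]
        simp [pvCnt, hp]


theorem count_eq_pvCnt (s sub : List Char) (hsub : sub ≠ []) :
    PySem.Chars.count s sub = pvCnt sub s := by
  rw [PySem.Chars.count]
  simp only [List.isEmpty_eq_false_iff.mpr hsub]
  rw [pvCnt_eq_countgo sub hsub s.length s 0 (Nat.le_refl _)]
  simp

def pvConsHd (p : List Char) : List (List Char) → List (List Char)
  | [] => [p]
  | h :: r => (p ++ h) :: r

theorem pvSplit_go : ∀ (fuel : Nat) (l cur : List Char) (acc : List (List Char)),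
    l.length < fuel →
    PySem.Chars.splitOn.go ['\n'] fuel l cur acc
      = acc.reverse ++ pvConsHd cur.reverse (pvSplitNl l) := by
  intro fuel
  induction fuel with
  | zero => intro l cur acc h; omega
  | succ n ih =>
    intro l cur acc h
    cases l with
    | nil => simp [PySem.Chars.splitOn.go, pvSplitNl, pvConsHd]
    | cons c rest =>
      rw [PySem.Chars.splitOn.go]
      by_cases hc : c = '\n'
      · subst hc
        have hpre : ['\n'].isPrefixOf ('\n' :: rest) = true := by simp [List.isPrefixOf]
        simp only [hpre, if_true, List.length_cons, List.length_nil, List.drop_succ_cons, List.drop_zero]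
        rw [ih rest [] (List.reverse cur :: acc) (by simp at h ⊢; omega)]
        obtain ⟨hh, hr, he⟩ : ∃ hh hr, pvSplitNl rest = hh :: hr := by
          cases hrw : pvSplitNl rest with
          | nil => exact absurd hrw (pvSplitNl_ne_nil rest)
          | cons a b => exact ⟨a, b, rfl⟩
        simp [pvSplitNl, he, pvConsHd]
      · have hpre : ['\n'].isPrefixOf (c :: rest) = false := by
          simp [List.isPrefixOf]
          exact fun h => hc h.symm
        simp only [hpre]
        rw [ih rest (c :: cur) acc (by simp at h ⊢; omega)]
        obtain ⟨hh, hr, he⟩ : ∃ hh hr, pvSplitNl rest = hh :: hr := by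
          cases hrw : pvSplitNl rest with
          | nil => exact absurd hrw (pvSplitNl_ne_nil rest)
          | cons a b => exact ⟨a, b, rfl⟩
        simp [pvSplitNl, he, pvConsHd, hc]

theorem splitOn_eq_pvSplitNl (s : List Char) :
    PySem.Chars.splitOn s ['\n'] = pvSplitNl s := by
  rw [PySem.Chars.splitOn, pvSplit_go (s.length + 1) s [] [] (Nat.lt_succ_self _)]
  cases hrw : pvSplitNl s with
  | nil => exact absurd hrw (pvSplitNl_ne_nil s)
  | cons a b => simp [pvConsHd]

theorem pvSplitNl_head (l : List Char) : ∃ h r, pvSplitNl l = h :: r ∧ h <+: l := by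
  induction l with
  | nil => exact ⟨[], [], rfl, List.nil_prefix⟩
  | cons c t ih =>
    by_cases hc : c = '\n'
    · exact ⟨[], pvSplitNl t, by simp [pvSplitNl, hc], List.nil_prefix⟩
    · obtain ⟨h, r, he, hp⟩ := ih
      exact ⟨c :: h, r, by simp [pvSplitNl, hc, he], List.cons_prefix_cons.mpr ⟨rfl, hp⟩⟩

theorem pvSplitNl_append (p l : List Char) (hnl : '\n' ∉ p) :
    pvSplitNl (p ++ l) = pvConsHd p (pvSplitNl l) := by
  induction p with
  | nil =>
    obtain ⟨h, r, he, -⟩ := pvSplitNl_head l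
    simp [he, pvConsHd]
  | cons c p' ih =>
    have hc : c ≠ '\n' := fun h => hnl (by simp [h])
    have hnl' : '\n' ∉ p' := fun h => hnl (by simp [h])
    obtain ⟨h, r, he, -⟩ := pvSplitNl_head l
    simp only [List.cons_append, pvSplitNl, hc, if_false, ih hnl', he, pvConsHd,
      List.cons_append]

theorem pvCnt_self_append (sub x : List Char) (hsub : sub ≠ []) :
    pvCnt sub (sub ++ x) = pvCnt sub x + 1 := by
  obtain ⟨a, sa, hs⟩ := List.exists_cons_of_ne_nil hsub
  subst hs
  have hpre : (a :: sa).isPrefixOf ((a :: sa) ++ x) = true :=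
    List.isPrefixOf_iff_prefix.mpr (List.prefix_append _ _)
  simp [pvCnt, hpre, List.drop_left']

theorem pvCnt_split (sub : List Char) (hsub : sub ≠ []) (hnl : '\n' ∉ sub) (s : List Char) :
    pvCnt sub s = ((pvSplitNl s).map (pvCnt sub)).sum := by
  suffices H : ∀ (n : Nat) (s : List Char), s.length ≤ n →
      pvCnt sub s = ((pvSplitNl s).map (pvCnt sub)).sum from H s.length s (Nat.le_refl _)
  intro n
  induction n with
  | zero =>
    intro s h
    have : s = [] := List.eq_nil_of_length_eq_zero (Nat.le_zero.mp h)
    subst this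
    simp [pvCnt, pvSplitNl]
  | succ n ih =>
    intro s h
    cases s with
    | nil => simp [pvCnt, pvSplitNl]
    | cons c t =>
      by_cases hp : sub.isPrefixOf (c :: t)
      · have hp' : sub <+: (c :: t) := List.isPrefixOf_iff_prefix.mp hp
        have hdec : c :: t = sub ++ List.drop sub.length (c :: t) :=
          (List.prefix_iff_eq_append.mp hp').symm
        obtain ⟨a, sa, hs⟩ := List.exists_cons_of_ne_nil hsub
        have hlen : (List.drop sub.length (c :: t)).length ≤ n := by
          simp only [List.length_drop, List.length_cons] at h ⊢
          subst hs; simp only [List.length_cons]; omega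
        calc pvCnt sub (c :: t)
            = pvCnt sub (sub ++ List.drop sub.length (c :: t)) := by rw [← hdec]
          _ = pvCnt sub (List.drop sub.length (c :: t)) + 1 := pvCnt_self_append _ _ hsub
          _ = ((pvSplitNl (List.drop sub.length (c :: t))).map (pvCnt sub)).sum + 1 := by
              rw [ih _ hlen]
          _ = ((pvSplitNl (c :: t)).map (pvCnt sub)).sum := by
              conv_rhs => rw [hdec, pvSplitNl_append sub _ hnl]
              obtain ⟨hh, hr, he, -⟩ := pvSplitNl_head (List.drop sub.length (c :: t))
              rw [he]
              simp [pvConsHd, pvCnt_self_append sub hh hsub]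
              omega
      · by_cases hc : c = '\n'
        · subst hc
          have ht : t.length ≤ n := by simp at h; omega
          simp only [pvCnt, hp, pvSplitNl, List.map_cons, List.sum_cons]
          rw [ih t ht]
          simp [pvCnt]
        · have ht : t.length ≤ n := by simp at h; omega
          obtain ⟨hh, hr, he, hpref⟩ := pvSplitNl_head t
          have hnp : sub.isPrefixOf (c :: hh) = false := by
            rw [Bool.eq_false_iff]
            intro hcon
            have h2 : sub <+: (c :: t) :=
              (List.isPrefixOf_iff_prefix.mp hcon).trans
                (List.cons_prefix_cons.mpr ⟨rfl, hpref⟩)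
            simp_all [List.isPrefixOf_iff_prefix]
          simp only [pvCnt, hp, if_false, pvSplitNl, hc, he, List.map_cons, List.sum_cons]
          rw [ih t ht, he]
          simp [List.map_cons, List.sum_cons, hnp]

theorem isIn_iff_pvCnt (sub s : List Char) (hsub : sub ≠ []) :
    PySem.Chars.isIn sub s = true ↔ pvCnt sub s ≠ 0 := by
  rw [PySem.Chars.isIn_iff_infix]
  induction s with
  | nil => simp [pvCnt, List.infix_nil, hsub]
  | cons c t ih =>
    rw [List.infix_cons_iff]
    by_cases hp : sub.isPrefixOf (c :: t)
    · simp [pvCnt, hp, List.isPrefixOf_iff_prefix.mp hp]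
    · have : ¬ sub <+: (c :: t) := fun hcon => hp (List.isPrefixOf_iff_prefix.mpr hcon)
      simp [pvCnt, hp, this, ih]

theorem pvBfold (L : List (List Char)) (a b c : Int) (ns : List String) :
    L.foldl (fun (st : (Int × Int × Int) × List String) line =>
      let tc := PySem.Chars.count line "Using tool:".toList
      ((st.1.1 + (PySem.Chars.count line "Thought:".toList : Int),
        st.1.2.1 + (tc : Int),
        st.1.2.2 + (PySem.Chars.count line "Tool Output:".toList : Int)),
       if tc ≠ 0 then
         st.2 ++ [String.ofList (PySem.Chars.strip
           (PySem.List.pyGetD (PySem.Chars.splitOn line "Using tool:".toList) (-1) []))]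
       else st.2)) ((a, b, c), ns)
    = ((a + ((L.map (fun l => PySem.Chars.count l "Thought:".toList)).sum : Nat),
        b + ((L.map (fun l => PySem.Chars.count l "Using tool:".toList)).sum : Nat),
        c + ((L.map (fun l => PySem.Chars.count l "Tool Output:".toList)).sum : Nat)),
       ns ++ (L.filter (fun l => decide (PySem.Chars.count l "Using tool:".toList ≠ 0))).map
         (fun l => String.ofList (PySem.Chars.strip
           (PySem.List.pyGetD (PySem.Chars.splitOn l "Using tool:".toList) (-1) [])))) := by
  induction L generalizing a b c ns with
  | nil => simp
  | cons x L ih =>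
    simp only [List.foldl_cons, List.map_cons, List.sum_cons, List.filter_cons]
    rw [ih]
    by_cases hx : PySem.Chars.count x "Using tool:".toList ≠ 0
    · simp only [ne_eq, hx, not_false_eq_true, if_true, decide_true, List.map_cons,
        List.append_assoc, List.singleton_append]
      refine Prod.ext (Prod.ext ?_ (Prod.ext ?_ ?_)) rfl <;> push_cast <;> ring
    · simp only [not_not] at hx
      simp only [ne_eq, hx, not_true_eq_false, if_false, decide_false, Nat.cast_zero,
        Nat.zero_add, Nat.cast_add]
      refine Prod.ext (Prod.ext ?_ (Prod.ext ?_ ?_)) rfl <;> push_cast <;> ring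

-- ===== VERDICT (by name: the statement is the Claim_ definition above) =====
theorem count_llm_calls_in_response_spec : Claim_equal_count_llm_calls_in_response := by
  intro s _
  unfold Spec_count_llm_calls_in_response
  unfold count_llm_calls_in_response count_llm_calls_in_response_alt
  rw [pvBfold]
  have hnlchar : ("\n".toList : List Char) = ['\n'] := rfl
  have hsplit : PySem.Chars.splitOn s.toList "\n".toList = pvSplitNl s.toList := by
    rw [hnlchar, splitOn_eq_pvSplitNl]
  have hcount : ∀ (m : String), m.toList ≠ [] → '\n' ∉ m.toList →
      PySem.Str.count s m
        = ((pvSplitNl s.toList).map (fun l => PySem.Chars.count l m.toList)).sum := by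
    intro m hm hnl
    have : PySem.Str.count s m = PySem.Chars.count s.toList m.toList := by
      simp [PySem.Str.count]
    rw [this, count_eq_pvCnt _ _ hm, pvCnt_split _ hm hnl]
    congr 1
    exact List.map_congr_left fun l _ => (count_eq_pvCnt l _ hm).symm
  have hTh := hcount "Thought:" (by decide) (by decide)
  have hUs := hcount "Using tool:" (by decide) (by decide)
  have hTo := hcount "Tool Output:" (by decide) (by decide)
  have hfilter : ∀ (L : List (List Char)),
      L.filter (fun l => PySem.Chars.isIn "Using tool:".toList l)
        = L.filter (fun l => decide (PySem.Chars.count l "Using tool:".toList ≠ 0)) := by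
    intro L
    refine List.filter_congr fun l _ => ?_
    have h1 := isIn_iff_pvCnt "Using tool:".toList l (by decide)
    rw [← count_eq_pvCnt l _ (by decide)] at h1
    by_cases h : PySem.Chars.count l "Using tool:".toList = 0
    · have h2 : PySem.Chars.isIn "Using tool:".toList l = false := by
        rw [Bool.eq_false_iff]
        intro hc
        exact (h1.mp hc) h
      rw [h2]
      symm
      rw [decide_eq_false_iff_not]
      exact fun hc => hc h
    · rw [h1.mpr h]
      symm
      rw [decide_eq_true_iff]
      exact h
  refine Prod.ext ?_ ?_
  · simp only [hsplit, hTh, hUs, hTo]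
    simp [PySem.Dict.ofList, PySem.Dict.update, PySem.Dict.insert, PySem.Dict.contains,
      PySem.Dict.empty, List.foldl]
  · by_cases hin : PySem.Str.isIn "Using tool:" s
    · simp only [hin, if_true, hsplit]
      rw [PySem.List.foldl_append_if
        (fun line => PySem.Chars.isIn "Using tool:".toList line)
        (fun line => String.ofList (PySem.Chars.strip
          (PySem.List.pyGetD (PySem.Chars.splitOn line "Using tool:".toList) (-1) [])))]
      rw [hfilter]
    · simp only [hin]
      have hz : PySem.Chars.count s.toList "Using tool:".toList = 0 := by
        rw [count_eq_pvCnt _ _ (by decide)]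
        by_contra h
        exact (Bool.eq_false_iff.mp (by simpa [PySem.Str.isIn] using hin))
          ((isIn_iff_pvCnt _ _ (by decide)).mpr h)
      have hsum : ((pvSplitNl s.toList).map
          (fun l => PySem.Chars.count l "Using tool:".toList)).sum = 0 := by
        rw [← hUs]
        simp [PySem.Str.count]
        rw [count_eq_pvCnt _ _ (by decide)] at hz ⊢
        exact hz
      have hall : ∀ l ∈ pvSplitNl s.toList,
          PySem.Chars.count l "Using tool:".toList = 0 := by
        intro l hl
        have := List.sum_eq_zero_iff.mp hsum
        exact this _ (List.mem_map_of_mem hl)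
      simp only [hsplit]
      rw [List.filter_eq_nil_iff.mpr ?_]
      · simp
      · intro l hl
        simpa using hall l hl
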